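-- pv_equiv track=rewrite | github.com/Unpaid-Interns/FoodManage | food_site/importer/CSVImport.py | sort_filename_array
-- ===== SOURCE A (Python) =====
-- validFilePrefixes = ["skus", "ingredients", "product_lines", "formulas"]
--
-- def sort_filename_array(filename_array):
--     new_filename_array = []
--     for i in [1, 2, 3, 0]:
--         valid, filename = sort_filename_helper(filename_array, validFilePrefixes[i])
--         if valid:
--             new_filename_array.append(filename)
--     if len(new_filename_array) == len(filename_array):
--         return new_filename_array
--     else:
--         return filename_array
--
-- def sort_filename_helper(filename_array, prefix_to_search_for):
--     for filename in filename_array: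
--         if prefix_to_search_for in filename:
--             return True, filename
--     return False, ""
-- ===== SOURCE B (Python) =====
-- validFilePrefixes = ["skus", "ingredients", "product_lines", "formulas"]
--
-- def sort_filename_array(filename_array):
--     # one pass: remember the first filename containing each prefix
--     ing = pl = fm = sk = None
--     for fn in filename_array:
--         if ing is None and "ingredients" in fn:
--             ing = fn
--         if pl is None and "product_lines" in fn:
--             pl = fn
--         if fm is None and "formulas" in fn:
--             fm = fn
--         if sk is None and "skus" in fn:
--             sk = fn
--     result = [x for x in (ing, pl, fm, sk) if x is not None]
--     return result if len(result) == len(filename_array) else filename_array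
-- ===== Notes on version B (the rewrite author's own statement) =====
-- stated objective: alternative
-- what changed: B makes a single pass over filename_array recording the first filename containing each of the four prefixes in four option slots, then emits them in the fixed category order, instead of A's four separate first-match scans (one per prefix); same cost in practice since A's scans short-circuit.
import Mathlib
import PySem

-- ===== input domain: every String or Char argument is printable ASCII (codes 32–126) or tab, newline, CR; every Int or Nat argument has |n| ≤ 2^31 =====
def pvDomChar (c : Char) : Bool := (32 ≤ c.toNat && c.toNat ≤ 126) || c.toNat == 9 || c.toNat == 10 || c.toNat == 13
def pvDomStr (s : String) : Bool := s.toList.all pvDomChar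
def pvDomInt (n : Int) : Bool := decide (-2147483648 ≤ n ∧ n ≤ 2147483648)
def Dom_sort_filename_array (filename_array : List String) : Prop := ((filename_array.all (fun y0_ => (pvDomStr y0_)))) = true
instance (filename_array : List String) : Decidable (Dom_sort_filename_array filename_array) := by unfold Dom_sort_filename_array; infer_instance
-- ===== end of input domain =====

-- ===== PORT A =====
-- B replaces A's four separate scans with a single pass; return-value equivalence proved below.
def validFilePrefixes : List String := ["skus", "ingredients", "product_lines", "formulas"]

def sort_filename_helper (filename_array : List String) (prefix_to_search_for : String) :
    Bool × String :=
  match filename_array with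
  | [] => (false, "")
  | filename :: rest =>
    if PySem.Str.isIn prefix_to_search_for filename then (true, filename)
    else sort_filename_helper rest prefix_to_search_for

def sort_filename_array (filename_array : List String) : List String :=
  let new_filename_array :=
    ([1, 2, 3, 0] : List Int).foldl
      (fun acc i =>
        let vf := sort_filename_helper filename_array (PySem.List.pyGetD validFilePrefixes i "")
        if vf.1 then acc ++ [vf.2] else acc) []
  if new_filename_array.length = filename_array.length then new_filename_array
  else filename_array

-- ===== PORT B =====
-- one-pass state: first filename containing each prefix (ingredients, product_lines, formulas, skus)
def altStep (st : Option String × Option String × Option String × Option String)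
    (fn : String) : Option String × Option String × Option String × Option String :=
  (if st.1.isNone && PySem.Str.isIn "ingredients" fn then some fn else st.1,
   if st.2.1.isNone && PySem.Str.isIn "product_lines" fn then some fn else st.2.1,
   if st.2.2.1.isNone && PySem.Str.isIn "formulas" fn then some fn else st.2.2.1,
   if st.2.2.2.isNone && PySem.Str.isIn "skus" fn then some fn else st.2.2.2)

def sort_filename_array_alt (filename_array : List String) : List String :=
  let st := filename_array.foldl altStep (none, none, none, none)
  let result := ([st.1, st.2.1, st.2.2.1, st.2.2.2] : List (Option String)).filterMap id
  if result.length = filename_array.length then result else filename_array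

-- ===== PRECONDITION & SPEC =====
def Spec_sort_filename_array (filename_array : List String) (out : List String) : Prop := out = sort_filename_array_alt filename_array
instance (filename_array : List String) (out : List String) : Decidable (Spec_sort_filename_array filename_array out) := by unfold Spec_sort_filename_array; infer_instance

-- ===== CLAIM (what is proved, stated in full; the proofs are below) =====
def Claim_equal_sort_filename_array : Prop := ∀ (filename_array : List String), Dom_sort_filename_array filename_array → Spec_sort_filename_array filename_array (sort_filename_array filename_array)

-- ===== LEMMAS AND PROOFS =====

-- the per-prefix update B performs on one component of its state
def scan1 (p : String) (o : Option String) (fn : String) : Option String :=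
  if o.isNone && PySem.Str.isIn p fn then some fn else o

theorem foldl_altStep_eq (xs : List String) :
    ∀ (a b c d : Option String),
      xs.foldl altStep (a, b, c, d) =
        (xs.foldl (scan1 "ingredients") a, xs.foldl (scan1 "product_lines") b,
         xs.foldl (scan1 "formulas") c, xs.foldl (scan1 "skus") d) := by
  induction xs with
  | nil => intro a b c d; rfl
  | cons f rest ih =>
    intro a b c d
    simp only [List.foldl_cons]
    exact ih _ _ _ _

theorem foldl_scan1_some (p : String) (v : String) (xs : List String) :
    xs.foldl (scan1 p) (some v) = some v := by
  induction xs with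
  | nil => rfl
  | cons f rest ih => simpa [scan1] using ih

theorem foldl_scan1_none (p : String) (xs : List String) :
    xs.foldl (scan1 p) none =
      (if (sort_filename_helper xs p).1 then some (sort_filename_helper xs p).2 else none) := by
  induction xs with
  | nil => rfl
  | cons f rest ih =>
    by_cases h : PySem.Chars.isIn p.toList f.toList = true
    · simp [scan1, sort_filename_helper, h, foldl_scan1_some]
    · simp [scan1, sort_filename_helper, h, ih]

theorem pyGetD_prefix1 : PySem.List.pyGetD validFilePrefixes 1 "" = "ingredients" := by decide
theorem pyGetD_prefix2 : PySem.List.pyGetD validFilePrefixes 2 "" = "product_lines" := by decide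
theorem pyGetD_prefix3 : PySem.List.pyGetD validFilePrefixes 3 "" = "formulas" := by decide
theorem pyGetD_prefix0 : PySem.List.pyGetD validFilePrefixes 0 "" = "skus" := by decide

-- ===== VERDICT (by name: the statement is the Claim_ definition above) =====
theorem sort_filename_array_spec : Claim_equal_sort_filename_array := by
  intro fa _
  unfold Spec_sort_filename_array
  simp only [sort_filename_array, sort_filename_array_alt, List.foldl_cons, List.foldl_nil,
    pyGetD_prefix1, pyGetD_prefix2, pyGetD_prefix3, pyGetD_prefix0,
    foldl_altStep_eq, foldl_scan1_none]
  by_cases h1 : (sort_filename_helper fa "ingredients").1 = true <;>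
    by_cases h2 : (sort_filename_helper fa "product_lines").1 = true <;>
      by_cases h3 : (sort_filename_helper fa "formulas").1 = true <;>
        by_cases h4 : (sort_filename_helper fa "skus").1 = true <;>
          simp [h1, h2, h3, h4, List.filterMap]
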